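-- pv_equiv track=rewrite | github.com/JCSong-89/ptyhon-algorithms | 모험가길드.py | chack_member_condition
-- ===== SOURCE A (Python) =====
-- def chack_member_condition(list):
--   count = 0
--   first_group = []
--   last_group = []
--
--   for i in range(len(list)):
--     if list[i] == 1 and 1 not in first_group or list[i] == 2 and 2 not in first_group or list[i] ==3 and 3 not in first_group:
--         first_group.append(list[i])
--     elif list[i] == 2 and 2 > len(last_group):
--         last_group.append(list[i])
--     else:
--         continue
--
--   if 3 == len(first_group):
--       count += 1
--   if 2 == len(last_group):
--       count += 1
--
--   return count
-- ===== SOURCE B (Python) =====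
-- def chack_member_condition(list):
--     present = set(list)
--     twos = list.count(2)
--     return (1 if {1, 2, 3} <= present else 0) + (1 if twos >= 3 else 0)
-- ===== Notes on version B (the rewrite author's own statement) =====
-- stated objective: simpler
-- what changed: Replaces the stateful element-by-element loop maintaining two accumulator lists with a closed form: a set-inclusion test for {1,2,3} plus a count of 2's compared against 3.
import Mathlib
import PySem

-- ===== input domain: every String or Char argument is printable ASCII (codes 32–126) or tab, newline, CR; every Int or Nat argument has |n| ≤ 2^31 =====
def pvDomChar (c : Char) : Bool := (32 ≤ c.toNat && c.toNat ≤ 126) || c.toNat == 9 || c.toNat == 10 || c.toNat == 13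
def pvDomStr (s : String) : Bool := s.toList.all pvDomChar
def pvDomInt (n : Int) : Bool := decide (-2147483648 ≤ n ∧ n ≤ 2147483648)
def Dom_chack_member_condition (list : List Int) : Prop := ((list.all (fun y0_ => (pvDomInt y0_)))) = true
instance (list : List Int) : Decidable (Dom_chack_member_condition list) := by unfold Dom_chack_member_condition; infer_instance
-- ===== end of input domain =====

-- B replaces A's stateful two-accumulator loop with a set-inclusion test plus a count of 2's (simpler; same result).
-- ===== PORT A =====
-- the 'for i in range(len(list))' loop of A, carrying (first_group, last_group); each iteration reads list[i]
def pvLoopA : List Int → List Int → List Int → List Int × List Int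
  | [], fg, lg => (fg, lg)
  | x :: rest, fg, lg =>
    if (x = 1 ∧ 1 ∉ fg) ∨ (x = 2 ∧ 2 ∉ fg) ∨ (x = 3 ∧ 3 ∉ fg) then
      pvLoopA rest (fg ++ [x]) lg
    else if x = 2 ∧ 2 > lg.length then
      pvLoopA rest fg (lg ++ [x])
    else
      pvLoopA rest fg lg

def chack_member_condition (list : List Int) : Int :=
  let r := pvLoopA list [] []
  (if r.1.length = 3 then (0 : Int) + 1 else 0) +
  (if r.2.length = 2 then 1 else 0)

-- ===== PORT B =====
def chack_member_condition_alt (list : List Int) : Int :=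
  let present : PySem.Set Int := PySem.Set.ofList list
  let twos : Int := PySem.List.count list 2
  (if PySem.Set.issubset (PySem.Set.ofList [1, 2, 3]) present then (1 : Int) else 0) +
  (if twos ≥ 3 then 1 else 0)

-- ===== PRECONDITION & SPEC =====
def Spec_chack_member_condition (list : List Int) (out : Int) : Prop := out = chack_member_condition_alt list
instance (list : List Int) (out : Int) : Decidable (Spec_chack_member_condition list out) := by unfold Spec_chack_member_condition; infer_instance

-- ===== CLAIM (what is proved, stated in full; the proofs are below) =====
def Claim_equal_chack_member_condition : Prop := ∀ (list : List Int), Dom_chack_member_condition list → Spec_chack_member_condition list (chack_member_condition list)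

-- ===== LEMMAS AND PROOFS =====

-- length of a nodup list whose elements are among 1,2,3, as a sum of membership indicators
lemma pvLen123 (L : List Int) (hnd : L.Nodup) (hsub : ∀ x ∈ L, x = 1 ∨ x = 2 ∨ x = 3) :
    L.length = (if (1:Int) ∈ L then 1 else 0) + (if (2:Int) ∈ L then 1 else 0) +
      (if (3:Int) ∈ L then 1 else 0) := by
  induction L with
  | nil => simp
  | cons a L ih =>
    have hnd' := hnd
    rw [List.nodup_cons] at hnd'
    have ha := hsub a (List.mem_cons_self ..)
    have hrest : ∀ x ∈ L, x = 1 ∨ x = 2 ∨ x = 3 := fun x hx => hsub x (List.mem_cons_of_mem _ hx)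
    have hih := ih hnd'.2 hrest
    rcases ha with rfl | rfl | rfl <;>
      simp only [List.length_cons, List.mem_cons, hih] <;>
      split_ifs <;> simp_all <;> omega

-- loop invariant for A's loop
lemma pvLoopA_spec (l : List Int) : ∀ (fg lg : List Int), fg.Nodup →
    (∀ x ∈ fg, x = 1 ∨ x = 2 ∨ x = 3) → lg.length ≤ 2 →
    (pvLoopA l fg lg).1.Nodup ∧
    (∀ x ∈ (pvLoopA l fg lg).1, x = 1 ∨ x = 2 ∨ x = 3) ∧
    (∀ x : Int, (x = 1 ∨ x = 2 ∨ x = 3) →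
      (x ∈ (pvLoopA l fg lg).1 ↔ x ∈ fg ∨ x ∈ l)) ∧
    (pvLoopA l fg lg).2.length =
      min 2 (lg.length + (if (2:Int) ∈ fg then l.count 2 else l.count 2 - 1)) := by
  induction l with
  | nil =>
    intro fg lg hnd hsub hlg
    refine ⟨by simpa [pvLoopA] using hnd, by simpa [pvLoopA] using hsub,
      by simp [pvLoopA], ?_⟩
    simp only [pvLoopA, List.count_nil]
    split_ifs <;> omega
  | cons a l ih =>
    intro fg lg hnd hsub hlg
    by_cases hb1 : (a = 1 ∧ 1 ∉ fg) ∨ (a = 2 ∧ 2 ∉ fg) ∨ (a = 3 ∧ 3 ∉ fg)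
    · -- first branch: a appended to first_group
      have ha : a = 1 ∨ a = 2 ∨ a = 3 := by rcases hb1 with ⟨h,_⟩|⟨h,_⟩|⟨h,_⟩ <;> simp [h]
      have hna : a ∉ fg := by rcases hb1 with ⟨h,h2⟩|⟨h,h2⟩|⟨h,h2⟩ <;> simpa [h] using h2
      have hstep : pvLoopA (a :: l) fg lg = pvLoopA l (fg ++ [a]) lg := by
        simp [pvLoopA, hb1]
      obtain ⟨i1, i2, i3, i4⟩ := ih (fg ++ [a]) lg
        (by simp [List.nodup_append]; aesop)
        (by
          intro x hx
          rcases List.mem_append.mp hx with h | h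
          · exact hsub x h
          · simp at h; subst h; exact ha)
        hlg
      refine ⟨by simpa [hstep] using i1, by simpa [hstep] using i2, ?_, ?_⟩
      · intro x hx
        rw [hstep, i3 x hx]
        simp only [List.mem_append, List.mem_cons, List.mem_singleton]
        tauto
      · rw [hstep, i4]
        by_cases ha2 : a = 2
        · subst ha2
          have hm : (2:Int) ∈ fg ++ [2] := by simp
          rw [if_pos hm, if_neg hna]
          simp [List.count_cons]
        · have h2m : ((2:Int) ∈ fg ++ [a]) ↔ (2:Int) ∈ fg := by
            simp; intro h; exact absurd h.symm ha2
          simp only [h2m]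
          have : (a :: l).count 2 = l.count 2 := by
            simp [List.count_cons]; intro h; exact absurd h ha2
          rw [this]
    · by_cases hb2 : a = 2 ∧ 2 > lg.length
      · -- second branch: a appended to last_group
        obtain ⟨ha2, hlt⟩ := hb2
        subst ha2
        have h2fg : (2:Int) ∈ fg := by
          by_contra h; exact hb1 (Or.inr (Or.inl ⟨rfl, h⟩))
        have hstep : pvLoopA (2 :: l) fg lg = pvLoopA l fg (lg ++ [2]) := by
          simp [pvLoopA, h2fg, hlt]
        obtain ⟨i1, i2, i3, i4⟩ := ih fg (lg ++ [2]) hnd hsub (by simp; omega)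
        refine ⟨by simpa [hstep] using i1, by simpa [hstep] using i2, ?_, ?_⟩
        · intro x hx
          rw [hstep, i3 x hx]
          constructor
          · rintro (h | h); exacts [Or.inl h, Or.inr (List.mem_cons_of_mem _ h)]
          · rintro (h | h)
            · exact Or.inl h
            · rcases List.mem_cons.mp h with rfl | h
              · exact Or.inl h2fg
              · exact Or.inr h
        · rw [hstep, i4]
          simp [h2fg, List.count_cons]
          omega
      · -- third branch: skip
        have hstep : pvLoopA (a :: l) fg lg = pvLoopA l fg lg := by
          simp only [pvLoopA, if_neg hb1, if_neg hb2]
        obtain ⟨i1, i2, i3, i4⟩ := ih fg lg hnd hsub hlg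
        refine ⟨by simpa [hstep] using i1, by simpa [hstep] using i2, ?_, ?_⟩
        · intro x hx
          rw [hstep, i3 x hx]
          constructor
          · rintro (h | h); exacts [Or.inl h, Or.inr (List.mem_cons_of_mem _ h)]
          · rintro (h | h)
            · exact Or.inl h
            · rcases List.mem_cons.mp h with rfl | h
              · -- a ∈ fg or the branch conditions force it; also a could be 2 with full lg
                rcases hx with rfl | rfl | rfl
                · by_cases hm : (1:Int) ∈ fg
                  · exact Or.inl hm
                  · exact absurd (Or.inl ⟨rfl, hm⟩) hb1
                · by_cases hm : (2:Int) ∈ fg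
                  · exact Or.inl hm
                  · exact absurd (Or.inr (Or.inl ⟨rfl, hm⟩)) hb1
                · by_cases hm : (3:Int) ∈ fg
                  · exact Or.inl hm
                  · exact absurd (Or.inr (Or.inr ⟨rfl, hm⟩)) hb1
              · exact Or.inr h
        · rw [hstep, i4]
          by_cases ha2 : a = 2
          · subst ha2
            have h2fg : (2:Int) ∈ fg := by
              by_contra h; exact hb1 (Or.inr (Or.inl ⟨rfl, h⟩))
            have hfull : lg.length = 2 := by omega
            simp [h2fg, List.count_cons, hfull]
          · have : (a :: l).count 2 = l.count 2 := by
              simp [List.count_cons]; intro h; exact absurd h ha2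
            rw [this]

lemma pvCountDefn (l : List Int) : PySem.List.count l (2:Int) = (l.count 2 : Int) := by
  simp [PySem.List.count_eq]

lemma pvIssubset (l : List Int) :
    PySem.Set.issubset (PySem.Set.ofList [(1:Int), 2, 3]) (PySem.Set.ofList l)
      = true ↔ ((1:Int) ∈ l ∧ (2:Int) ∈ l ∧ (3:Int) ∈ l) := by
  simp [PySem.Set.issubset_iff]

-- ===== VERDICT (by name: the statement is the Claim_ definition above) =====
theorem chack_member_condition_spec : Claim_equal_chack_member_condition := by
  intro list _
  unfold Spec_chack_member_condition chack_member_condition chack_member_condition_alt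
  obtain ⟨hnd, hsub, hmem, hlen⟩ := pvLoopA_spec list [] [] (by simp) (by simp) (by simp)
  have h1 := hmem 1 (by simp)
  have h2 := hmem 2 (by simp)
  have h3 := hmem 3 (by simp)
  simp only [List.not_mem_nil, false_or] at h1 h2 h3
  have hL := pvLen123 _ hnd hsub
  rw [pvCountDefn]
  simp only [hL, h1, h2, h3, hlen, pvIssubset, List.not_mem_nil, if_false, List.length_nil]
  by_cases c1 : (1:Int) ∈ list <;> by_cases c2 : (2:Int) ∈ list <;> by_cases c3 : (3:Int) ∈ list <;>
    · have hc : (1 ≤ list.count 2) ↔ (2:Int) ∈ list := List.one_le_count_iff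
      simp [c1, c2, c3] at hc ⊢ <;> split_ifs <;> omega
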